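-- pv_equiv track=rewrite | github.com/saravana41197-star/stock-market-app | dynamic_reason_generator.py | _format_user_friendly_reason
-- ===== SOURCE A (Python) =====
-- def _format_user_friendly_reason(event: str, stock_symbol: str, sector: str) -> str:
--     """Format event into user-friendly reason."""
--     # Extract key information from event
--     event_lower = event.lower()
--
--     # Festival-based reasons
--     if any(festival in event_lower for festival in ['pongal', 'diwali', 'eid', 'festival']):
--         if sector in ['retail', 'auto', 'consumer']:
--             return f"Festival season boosting demand - {stock_symbol} may benefit"
--         elif sector == 'agriculture':
--             return f"Festival season increasing consumption - Related stocks may rise"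
--
--     # Season-based reasons
--     if any(season in event_lower for season in ['monsoon', 'rain', 'winter', 'summer']):
--         if sector == 'agriculture':
--             return f"{event.title()} - Agriculture stocks may see movement"
--         elif sector == 'energy':
--             return f"{event.title()} - Energy demand may increase"
--         elif sector == 'infrastructure':
--             return f"{event.title()} - Construction activity may be affected"
--
--     # Economy-based reasons
--     if any(econ in event_lower for econ in ['budget', 'gdp', 'economy', 'growth']):
--         if sector == 'infrastructure':
--             return f"Economic growth positive - Infrastructure stocks may benefit"
--         elif sector == 'bank':
--             return f"Economy improving - Banking sector may see gains"
--         elif sector == 'retail':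
--             return f"Economic growth - Consumer spending may increase"
--
--     # Market-based reasons
--     if any(market in event_lower for market in ['market', 'investor', 'trading']):
--         return f"Market sentiment positive - {stock_symbol} showing strength"
--
--     # Government policy reasons
--     if any(gov in event_lower for gov in ['government', 'policy', 'modi', 'rbi']):
--         if sector == 'bank':
--             return "Government policies favorable - Banking sector may benefit"
--         elif sector == 'infrastructure':
--             return "New policies announced - Infrastructure stocks may rise"
--
--     # Generic positive reason
--     return f"Current market conditions favorable - {stock_symbol} may perform well"
-- ===== SOURCE B (Python) =====
-- # Table-driven re-implementation: ordered rules of (keywords, [(sector-or-None, template pieces)]),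
-- # scanned once; templates rendered from pieces so no f-string duplication.
--
-- _SYM = object()    # placeholder: stock_symbol
-- _TITLE = object()  # placeholder: event.title()
--
-- _RULES = [
--     (['pongal', 'diwali', 'eid', 'festival'], [
--         ('retail',      ["Festival season boosting demand - ", _SYM, " may benefit"]),
--         ('auto',        ["Festival season boosting demand - ", _SYM, " may benefit"]),
--         ('consumer',    ["Festival season boosting demand - ", _SYM, " may benefit"]),
--         ('agriculture', ["Festival season increasing consumption - Related stocks may rise"]),
--     ]),
--     (['monsoon', 'rain', 'winter', 'summer'], [
--         ('agriculture',    [_TITLE, " - Agriculture stocks may see movement"]),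
--         ('energy',         [_TITLE, " - Energy demand may increase"]),
--         ('infrastructure', [_TITLE, " - Construction activity may be affected"]),
--     ]),
--     (['budget', 'gdp', 'economy', 'growth'], [
--         ('infrastructure', ["Economic growth positive - Infrastructure stocks may benefit"]),
--         ('bank',           ["Economy improving - Banking sector may see gains"]),
--         ('retail',         ["Economic growth - Consumer spending may increase"]),
--     ]),
--     (['market', 'investor', 'trading'], [
--         (None, ["Market sentiment positive - ", _SYM, " showing strength"]),  # any sector
--     ]),
--     (['government', 'policy', 'modi', 'rbi'], [
--         ('bank',           ["Government policies favorable - Banking sector may benefit"]),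
--         ('infrastructure', ["New policies announced - Infrastructure stocks may rise"]),
--     ]),
-- ]
--
-- _DEFAULT = ["Current market conditions favorable - ", _SYM, " may perform well"]
--
--
-- def _match_rule(event_lower, sector):
--     for keywords, table in _RULES:
--         if any(k in event_lower for k in keywords):
--             for sec, pieces in table:
--                 if sec is None or sector == sec:
--                     return pieces
--             # keyword hit but sector not listed: fall through to the next rule
--     return None
--
--
-- def _render(pieces, sym, title):
--     out = ""
--     for p in pieces:
--         out += sym if p is _SYM else title if p is _TITLE else p
--     return out
--
--
-- def _format_user_friendly_reason(event: str, stock_symbol: str, sector: str) -> str: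
--     pieces = _match_rule(event.lower(), sector)
--     if pieces is None:
--         pieces = _DEFAULT
--     return _render(pieces, stock_symbol, event.title())
-- ===== Notes on version B (the rewrite author's own statement) =====
-- stated objective: simpler
-- what changed: Replaces A's five hand-written if/elif blocks (each duplicating keyword tests and f-strings) by one ordered data table of (keywords, sector->template) rules scanned by a single generic loop with a shared piece-list renderer, preserving fall-through on unlisted sectors.
import Mathlib
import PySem

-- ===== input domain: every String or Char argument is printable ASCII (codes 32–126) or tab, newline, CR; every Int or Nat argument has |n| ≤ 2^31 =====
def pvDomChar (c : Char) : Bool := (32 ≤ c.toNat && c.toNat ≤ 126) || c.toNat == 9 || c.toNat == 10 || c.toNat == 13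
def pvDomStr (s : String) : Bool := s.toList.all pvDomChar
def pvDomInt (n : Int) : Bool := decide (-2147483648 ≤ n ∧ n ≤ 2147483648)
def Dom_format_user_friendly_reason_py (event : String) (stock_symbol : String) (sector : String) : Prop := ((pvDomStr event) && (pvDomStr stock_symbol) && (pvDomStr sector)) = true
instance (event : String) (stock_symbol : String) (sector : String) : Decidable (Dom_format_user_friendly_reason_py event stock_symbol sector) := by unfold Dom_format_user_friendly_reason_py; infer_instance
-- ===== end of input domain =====

-- B replaces A's five hand-written if/elif blocks by one ordered rule table scanned by a single
-- loop with a shared template renderer (objective: simpler / data-driven); same return value.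

-- hand port of str.title(): exact on ASCII input (word boundary = non-ASCII-letter), shared by both ports
def pvIsAlpha (c : Char) : Bool :=
  ('a' ≤ c && c ≤ 'z') || ('A' ≤ c && c ≤ 'Z')

def pvTitleGo : Bool → List Char → List Char
  | _, [] => []
  | prevAlpha, c :: rest =>
    if pvIsAlpha c then
      (if prevAlpha then c.toLower else c.toUpper) :: pvTitleGo true rest
    else
      c :: pvTitleGo false rest

def pyTitle (s : String) : String := String.ofList (pvTitleGo false s.toList)

-- ===== PORT A =====
-- A's early-return blocks are transliterated as continuation helpers: pyBlockK is
-- 'what the Python returns from its K-th comment block on' (block order and branch order kept).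
def pyGeneric (stock_symbol : String) : String :=
  "Current market conditions favorable - " ++ stock_symbol ++ " may perform well"

-- '# Government policy reasons'
def pyBlock5 (event_lower : String) (stock_symbol : String) (sector : String) : String :=
  if ["government", "policy", "modi", "rbi"].any (fun g => PySem.Str.isIn g event_lower) then
    if sector == "bank" then "Government policies favorable - Banking sector may benefit"
    else if sector == "infrastructure" then "New policies announced - Infrastructure stocks may rise"
    else pyGeneric stock_symbol
  else pyGeneric stock_symbol

-- '# Market-based reasons'
def pyBlock4 (event_lower : String) (stock_symbol : String) (sector : String) : String :=
  if ["market", "investor", "trading"].any (fun m => PySem.Str.isIn m event_lower) then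
    "Market sentiment positive - " ++ stock_symbol ++ " showing strength"
  else pyBlock5 event_lower stock_symbol sector

-- '# Economy-based reasons'
def pyBlock3 (event_lower : String) (stock_symbol : String) (sector : String) : String :=
  if ["budget", "gdp", "economy", "growth"].any (fun e => PySem.Str.isIn e event_lower) then
    if sector == "infrastructure" then "Economic growth positive - Infrastructure stocks may benefit"
    else if sector == "bank" then "Economy improving - Banking sector may see gains"
    else if sector == "retail" then "Economic growth - Consumer spending may increase"
    else pyBlock4 event_lower stock_symbol sector
  else pyBlock4 event_lower stock_symbol sector

-- '# Season-based reasons'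
def pyBlock2 (event : String) (event_lower : String) (stock_symbol : String) (sector : String) : String :=
  if ["monsoon", "rain", "winter", "summer"].any (fun s => PySem.Str.isIn s event_lower) then
    if sector == "agriculture" then pyTitle event ++ " - Agriculture stocks may see movement"
    else if sector == "energy" then pyTitle event ++ " - Energy demand may increase"
    else if sector == "infrastructure" then pyTitle event ++ " - Construction activity may be affected"
    else pyBlock3 event_lower stock_symbol sector
  else pyBlock3 event_lower stock_symbol sector

-- '# Festival-based reasons' and the function itself
def format_user_friendly_reason_py (event : String) (stock_symbol : String) (sector : String) : String :=
  let event_lower := PySem.Str.lower event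
  if ["pongal", "diwali", "eid", "festival"].any (fun f => PySem.Str.isIn f event_lower) then
    if ["retail", "auto", "consumer"].contains sector then
      "Festival season boosting demand - " ++ stock_symbol ++ " may benefit"
    else if sector == "agriculture" then
      "Festival season increasing consumption - Related stocks may rise"
    else pyBlock2 event event_lower stock_symbol sector
  else pyBlock2 event event_lower stock_symbol sector

-- ===== PORT B =====
inductive PvPiece : Type
  | lit : String → PvPiece
  | sym : PvPiece
  | title : PvPiece
deriving DecidableEq, Repr

def pvRules : List (List String × List (Option String × List PvPiece)) :=
  [ (["pongal", "diwali", "eid", "festival"],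
      [ (some "retail",      [.lit "Festival season boosting demand - ", .sym, .lit " may benefit"]),
        (some "auto",        [.lit "Festival season boosting demand - ", .sym, .lit " may benefit"]),
        (some "consumer",    [.lit "Festival season boosting demand - ", .sym, .lit " may benefit"]),
        (some "agriculture", [.lit "Festival season increasing consumption - Related stocks may rise"]) ]),
    (["monsoon", "rain", "winter", "summer"],
      [ (some "agriculture",    [.title, .lit " - Agriculture stocks may see movement"]),
        (some "energy",         [.title, .lit " - Energy demand may increase"]),
        (some "infrastructure", [.title, .lit " - Construction activity may be affected"]) ]),
    (["budget", "gdp", "economy", "growth"],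
      [ (some "infrastructure", [.lit "Economic growth positive - Infrastructure stocks may benefit"]),
        (some "bank",           [.lit "Economy improving - Banking sector may see gains"]),
        (some "retail",         [.lit "Economic growth - Consumer spending may increase"]) ]),
    (["market", "investor", "trading"],
      [ (none, [.lit "Market sentiment positive - ", .sym, .lit " showing strength"]) ]),
    (["government", "policy", "modi", "rbi"],
      [ (some "bank",           [.lit "Government policies favorable - Banking sector may benefit"]),
        (some "infrastructure", [.lit "New policies announced - Infrastructure stocks may rise"]) ]) ]

def pvDefault : List PvPiece :=
  [.lit "Current market conditions favorable - ", .sym, .lit " may perform well"]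

def pvLookupSector : List (Option String × List PvPiece) → String → Option (List PvPiece)
  | [], _ => none
  | (sec, pieces) :: rest, sector =>
    match sec with
    | none => some pieces
    | some s => if sector == s then some pieces else pvLookupSector rest sector

def pvMatchRule : List (List String × List (Option String × List PvPiece)) → String → String → Option (List PvPiece)
  | [], _, _ => none
  | (keywords, table) :: rest, event_lower, sector =>
    if keywords.any (fun k => PySem.Str.isIn k event_lower) then
      match pvLookupSector table sector with
      | some pieces => some pieces
      | none => pvMatchRule rest event_lower sector
    else pvMatchRule rest event_lower sector

def pvRender (pieces : List PvPiece) (symv : String) (titlev : String) : String :=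
  pieces.foldl (fun out p => out ++ (match p with | .lit s => s | .sym => symv | .title => titlev)) ""

def format_user_friendly_reason_py_alt (event : String) (stock_symbol : String) (sector : String) : String :=
  let pieces := (pvMatchRule pvRules (PySem.Str.lower event) sector).getD pvDefault
  pvRender pieces stock_symbol (pyTitle event)

-- ===== PRECONDITION & SPEC =====
def Spec_format_user_friendly_reason_py (event : String) (stock_symbol : String) (sector : String) (out : String) : Prop := out = format_user_friendly_reason_py_alt event stock_symbol sector
instance (event : String) (stock_symbol : String) (sector : String) (out : String) : Decidable (Spec_format_user_friendly_reason_py event stock_symbol sector out) := by unfold Spec_format_user_friendly_reason_py; infer_instance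

-- ===== CLAIM (what is proved, stated in full; the proofs are below) =====
def Claim_equal_format_user_friendly_reason_py : Prop := ∀ (event : String) (stock_symbol : String) (sector : String), Dom_format_user_friendly_reason_py event stock_symbol sector → Spec_format_user_friendly_reason_py event stock_symbol sector (format_user_friendly_reason_py event stock_symbol sector)

-- ===== LEMMAS AND PROOFS =====

-- block 5 (government) against the last rule of the table
theorem pv_block5_eq (el sym sector t : String) :
    pyBlock5 el sym sector =
      pvRender ((pvMatchRule [(["government", "policy", "modi", "rbi"],
        [ (some "bank",           [.lit "Government policies favorable - Banking sector may benefit"]),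
          (some "infrastructure", [.lit "New policies announced - Infrastructure stocks may rise"]) ])] el sector).getD pvDefault) sym t := by
  unfold pyBlock5 pyGeneric
  simp only [pvMatchRule, pvLookupSector]
  split_ifs <;> simp [pvRender, pvDefault, String.empty_append]

-- block 4 (market)
theorem pv_block4_eq (el sym sector t : String) :
    pyBlock4 el sym sector =
      pvRender ((pvMatchRule
        [ (["market", "investor", "trading"],
            [ (none, [.lit "Market sentiment positive - ", .sym, .lit " showing strength"]) ]),
          (["government", "policy", "modi", "rbi"],
            [ (some "bank",           [.lit "Government policies favorable - Banking sector may benefit"]),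
              (some "infrastructure", [.lit "New policies announced - Infrastructure stocks may rise"]) ]) ] el sector).getD pvDefault) sym t := by
  unfold pyBlock4
  rw [pvMatchRule]
  split_ifs with h
  · simp [pvLookupSector, pvRender, String.empty_append]
  · exact pv_block5_eq el sym sector t

-- block 3 (economy)
theorem pv_block3_eq (el sym sector t : String) :
    pyBlock3 el sym sector =
      pvRender ((pvMatchRule
        [ (["budget", "gdp", "economy", "growth"],
            [ (some "infrastructure", [.lit "Economic growth positive - Infrastructure stocks may benefit"]),
              (some "bank",           [.lit "Economy improving - Banking sector may see gains"]),
              (some "retail",         [.lit "Economic growth - Consumer spending may increase"]) ]),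
          (["market", "investor", "trading"],
            [ (none, [.lit "Market sentiment positive - ", .sym, .lit " showing strength"]) ]),
          (["government", "policy", "modi", "rbi"],
            [ (some "bank",           [.lit "Government policies favorable - Banking sector may benefit"]),
              (some "infrastructure", [.lit "New policies announced - Infrastructure stocks may rise"]) ]) ] el sector).getD pvDefault) sym t := by
  unfold pyBlock3
  rw [pvMatchRule]
  split_ifs with h h1 h2 h3
  · simp [pvLookupSector, h1, pvRender, String.empty_append]
  · simp [pvLookupSector, h1, h2, pvRender, String.empty_append]
  · simp [pvLookupSector, h1, h2, h3, pvRender, String.empty_append]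
  · simp only [pvLookupSector, h1, h2, h3, if_neg, Bool.false_eq_true, ite_false]
    exact pv_block4_eq el sym sector t
  · exact pv_block4_eq el sym sector t

-- block 2 (season); 'event' carries the original-case string for .title()
theorem pv_block2_eq (event el sym sector : String) :
    pyBlock2 event el sym sector =
      pvRender ((pvMatchRule
        [ (["monsoon", "rain", "winter", "summer"],
            [ (some "agriculture",    [.title, .lit " - Agriculture stocks may see movement"]),
              (some "energy",         [.title, .lit " - Energy demand may increase"]),
              (some "infrastructure", [.title, .lit " - Construction activity may be affected"]) ]),
          (["budget", "gdp", "economy", "growth"],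
            [ (some "infrastructure", [.lit "Economic growth positive - Infrastructure stocks may benefit"]),
              (some "bank",           [.lit "Economy improving - Banking sector may see gains"]),
              (some "retail",         [.lit "Economic growth - Consumer spending may increase"]) ]),
          (["market", "investor", "trading"],
            [ (none, [.lit "Market sentiment positive - ", .sym, .lit " showing strength"]) ]),
          (["government", "policy", "modi", "rbi"],
            [ (some "bank",           [.lit "Government policies favorable - Banking sector may benefit"]),
              (some "infrastructure", [.lit "New policies announced - Infrastructure stocks may rise"]) ]) ] el sector).getD pvDefault) sym (pyTitle event) := by
  unfold pyBlock2
  rw [pvMatchRule]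
  split_ifs with h h1 h2 h3
  · simp [pvLookupSector, h1, pvRender, String.empty_append]
  · simp [pvLookupSector, h1, h2, pvRender, String.empty_append]
  · simp [pvLookupSector, h1, h2, h3, pvRender, String.empty_append]
  · simp only [pvLookupSector, h1, h2, h3, if_neg, Bool.false_eq_true, ite_false]
    exact pv_block3_eq el sym sector (pyTitle event)
  · exact pv_block3_eq el sym sector (pyTitle event)

-- ===== VERDICT (by name: the statement is the Claim_ definition above) =====
theorem format_user_friendly_reason_py_spec : Claim_equal_format_user_friendly_reason_py := by
  intro event sym sector _
  unfold Spec_format_user_friendly_reason_py format_user_friendly_reason_py format_user_friendly_reason_py_alt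
  simp only []
  rw [pvRules, pvMatchRule]
  split_ifs with h h1 h2
  · simp only [List.contains_cons, List.contains_nil, List.elem_cons, List.elem_nil,
      Bool.or_false, Bool.or_eq_true] at h1
    rcases h1 with h1 | h1 | h1 <;>
      simp [pvLookupSector, h1, pvRender, String.empty_append]
  · simp only [List.contains_cons, List.contains_nil, List.elem_cons, List.elem_nil,
      Bool.or_false, Bool.or_eq_true, not_or] at h1
    simp only [pvLookupSector, h1.1, h1.2.1, h1.2.2, h2, Bool.false_eq_true, ite_false, ite_true]
    simp [pvRender, String.empty_append]
  · simp only [List.contains_cons, List.contains_nil, List.elem_cons, List.elem_nil,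
      Bool.or_false, Bool.or_eq_true, not_or] at h1
    simp only [pvLookupSector, h1.1, h1.2.1, h1.2.2, h2, Bool.false_eq_true, ite_false]
    exact pv_block2_eq event (PySem.Str.lower event) sym sector
  · exact pv_block2_eq event (PySem.Str.lower event) sym sector
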